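-- pv_equiv track=rewrite | github.com/IPTnet/ipt_connect | ipt_connect/IPTdev/tactics.py | sort_raw_tactics_data
-- ===== SOURCE A (Python) =====
-- def sort_raw_tactics_data(problems_dict):
--     # The first list consists of banned problems
--     # sorted in reverse order on when the bans are removed
--
--     bans = []
--     for reason in [
--         'presented_in_this_match',
--         'apriori_rejected_by_reporter',
--         'eternally_rejected_by_reporter',
--         'reported_by_reporter',
--         'opposed_by_opponent',
--         'reported_by_opponent',
--     ]:
--         for problem in list(problems_dict)[::-1]:
--             if len(problems_dict[problem][reason]) > 0:
--                 bans.append((problem, problems_dict.pop(problem)))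
--
--     # The second list consists of available problems
--
--     # Firstly, we collect the problems which the teams has already interacted with
--
--     info = []
--     for reason in [
--         'tried_by_opponent',
--         'reviewed_by_opponent',
--         'opposed_by_reporter',
--         'reviewed_by_reporter',
--         'tried_by_reporter',
--     ]:
--         for problem in list(problems_dict):
--             if len(problems_dict[problem][reason]) > 0:
--                 info.append((problem, problems_dict.pop(problem)))
--
--     # And then we append all the other problems
--
--     for problem in list(problems_dict):
--         info.append((problem, problems_dict.pop(problem)))
--
--     return bans, info
-- ===== SOURCE B (Python) =====
-- # Alternative decomposition: classify each problem once by its first applicable reason,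
-- # then assemble the two result lists from the classification.
-- # Like A, this empties the problems_dict argument in place (A pops every key; we clear it).
--
-- _BAN = [
--     'presented_in_this_match',
--     'apriori_rejected_by_reporter',
--     'eternally_rejected_by_reporter',
--     'reported_by_reporter',
--     'opposed_by_opponent',
--     'reported_by_opponent',
-- ]
--
-- _INFO = [
--     'tried_by_opponent',
--     'reviewed_by_opponent',
--     'opposed_by_reporter',
--     'reviewed_by_reporter',
--     'tried_by_reporter',
-- ]
--
--
-- def _cls(data):
--     # first reason (ban reasons first, then info reasons) with a non-empty list, else None
--     for r in _BAN + _INFO: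
--         if len(data[r]) > 0:
--             return r
--     return None
--
--
-- def sort_raw_tactics_data(problems_dict):
--     items = list(problems_dict.items())
--     problems_dict.clear()
--     tagged = [(p, d, _cls(d)) for p, d in items]
--     bans = [(p, d) for r in _BAN for (p, d, c) in reversed(tagged) if c == r]
--     info = [(p, d) for r in _INFO for (p, d, c) in tagged if c == r]
--     info += [(p, d) for (p, d, c) in tagged if c is None]
--     return bans, info
-- ===== Notes on version B (the rewrite author's own statement) =====
-- stated objective: alternative
-- what changed: A makes eleven destructive passes over the shrinking dict (snapshotting and popping keys per reason); B classifies every problem once by its first applicable reason and then assembles the bans (reversed per reason) and info (forward) lists from that classification.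
import Mathlib
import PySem

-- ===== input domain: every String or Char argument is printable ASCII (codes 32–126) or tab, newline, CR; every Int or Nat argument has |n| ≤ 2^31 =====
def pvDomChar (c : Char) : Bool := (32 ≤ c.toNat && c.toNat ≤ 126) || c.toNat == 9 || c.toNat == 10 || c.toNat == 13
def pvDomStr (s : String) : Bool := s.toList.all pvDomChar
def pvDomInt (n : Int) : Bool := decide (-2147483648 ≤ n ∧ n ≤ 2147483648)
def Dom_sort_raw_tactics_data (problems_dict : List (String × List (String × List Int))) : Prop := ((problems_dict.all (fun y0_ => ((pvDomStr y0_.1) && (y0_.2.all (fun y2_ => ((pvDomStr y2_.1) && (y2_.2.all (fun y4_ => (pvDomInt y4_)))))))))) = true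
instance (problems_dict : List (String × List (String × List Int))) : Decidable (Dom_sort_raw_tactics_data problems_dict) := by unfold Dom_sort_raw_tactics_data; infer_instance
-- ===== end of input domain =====

-- B replaces A's six+five destructive pop-passes over the dict by a single classification
-- pass plus per-reason assembly (alternative decomposition, same asymptotic cost).
-- Both A and B empty the problems_dict argument in place; the theorems are about the return value.

-- the two reason lists, shared module constants of both programs
def pvReasonsBan : List String :=
  ["presented_in_this_match", "apriori_rejected_by_reporter", "eternally_rejected_by_reporter",
   "reported_by_reporter", "opposed_by_opponent", "reported_by_opponent"]

def pvReasonsInfo : List String :=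
  ["tried_by_opponent", "reviewed_by_opponent", "opposed_by_reporter",
   "reviewed_by_reporter", "tried_by_reporter"]

-- len(data[reason]) > 0 ; data[reason] is a first-match dict lookup.  Where Python raises
-- KeyError (reason absent) this total stand-in reads [], i.e. "empty": Pre_ excludes those inputs.
def pvNonempty (data : List (String × List Int)) (r : String) : Bool :=
  decide (0 < ((List.lookup r data).getD []).length)

-- ===== PORT A =====
-- one pass of A's inner loop: iterate a snapshot of the keys (reversed for ban reasons),
-- popping (append + erase first occurrence) every problem whose list for `reason` is non-empty
def pvPass (rev : Bool) (reason : String)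
    (st : List (String × List (String × List Int)) × List (String × List (String × List Int))) :
    List (String × List (String × List Int)) × List (String × List (String × List Int)) :=
  let ks := st.2.map Prod.fst
  (if rev then ks.reverse else ks).foldl
    (fun st' p =>
      if pvNonempty ((List.lookup p st'.2).getD []) reason then
        (st'.1 ++ [(p, (List.lookup p st'.2).getD [])], st'.2.eraseP (fun e => e.1 == p))
      else st') st

def sort_raw_tactics_data (problems_dict : List (String × List (String × List Int))) : (List (String × (List (String × List Int)))) × (List (String × (List (String × List Int)))) :=
  let st1 := pvReasonsBan.foldl (fun st r => pvPass true r st) ([], problems_dict)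
  let st2 := pvReasonsInfo.foldl (fun st r => pvPass false r st) ([], st1.2)
  -- "And then we append all the other problems": pop every remaining key in order
  let st3 := (st2.2.map Prod.fst).foldl
    (fun st p => (st.1 ++ [(p, (List.lookup p st.2).getD [])], st.2.eraseP (fun e => e.1 == p))) st2
  (st1.1, st3.1)

-- ===== PORT B =====
-- first reason (ban reasons first, then info reasons) whose list is non-empty, else none
def pvCls (data : List (String × List Int)) : Option String :=
  (pvReasonsBan ++ pvReasonsInfo).find? (fun r => pvNonempty data r)

def sort_raw_tactics_data_alt (problems_dict : List (String × List (String × List Int))) : (List (String × (List (String × List Int)))) × (List (String × (List (String × List Int)))) :=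
  let tagged := problems_dict.map (fun pr => (pr.1, pr.2, pvCls pr.2))
  let bans := pvReasonsBan.flatMap
    (fun r => (tagged.reverse.filter (fun t => t.2.2 == some r)).map (fun t => (t.1, t.2.1)))
  let info := pvReasonsInfo.flatMap
    (fun r => (tagged.filter (fun t => t.2.2 == some r)).map (fun t => (t.1, t.2.1)))
  let other := (tagged.filter (fun t => t.2.2.isNone)).map (fun t => (t.1, t.2.1))
  (bans, info ++ other)

-- ===== PRECONDITION & SPEC =====
-- Pre_ excludes (a) duplicate outer/inner keys — impossible in a real Python dict, an artefact of
-- the assoc-list model — and (b) inputs where some problem's dict lacks a reason key that is read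
-- before the problem is popped: there Python A (and B alike) raises KeyError and returns nothing.
def Pre_sort_raw_tactics_data (problems_dict : List (String × List (String × List Int))) : Prop :=
  (problems_dict.map Prod.fst).Nodup ∧
  ∀ pr ∈ problems_dict, (pr.2.map Prod.fst).Nodup ∧
    ∀ j ∈ List.range (pvReasonsBan ++ pvReasonsInfo).length,
      (∀ i ∈ List.range j, List.lookup ((pvReasonsBan ++ pvReasonsInfo).getD i "") pr.2 = some []) →
      (List.lookup ((pvReasonsBan ++ pvReasonsInfo).getD j "") pr.2).isSome
instance (problems_dict : List (String × List (String × List Int))) : Decidable (Pre_sort_raw_tactics_data problems_dict) := by unfold Pre_sort_raw_tactics_data; infer_instance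

def pvWitness_sort_raw_tactics_data : (List (String × List (String × List Int))) :=
  [("mech", [("presented_in_this_match", [3])]),
   ("opt", [("presented_in_this_match", []), ("apriori_rejected_by_reporter", []),
            ("eternally_rejected_by_reporter", []), ("reported_by_reporter", []),
            ("opposed_by_opponent", []), ("reported_by_opponent", []),
            ("tried_by_opponent", [1, 2]), ("reviewed_by_opponent", [])])]

def Spec_sort_raw_tactics_data (problems_dict : List (String × List (String × List Int))) (out : (List (String × (List (String × List Int)))) × (List (String × (List (String × List Int))))) : Prop := out = sort_raw_tactics_data_alt problems_dict
instance (problems_dict : List (String × List (String × List Int))) (out : (List (String × (List (String × List Int)))) × (List (String × (List (String × List Int))))) : Decidable (Spec_sort_raw_tactics_data problems_dict out) := by unfold Spec_sort_raw_tactics_data; exact @instDecidableEqProd _ _ inferInstance inferInstance _ _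

-- ===== CLAIM (what is proved, stated in full; the proofs are below) =====
def Claim_equal_sort_raw_tactics_data : Prop := ∀ (problems_dict : List (String × List (String × List Int))), Dom_sort_raw_tactics_data problems_dict → Pre_sort_raw_tactics_data problems_dict → Spec_sort_raw_tactics_data problems_dict (sort_raw_tactics_data problems_dict)


-- ===== LEMMAS AND PROOFS =====

-- `rs.find?` of the first reason with a non-empty list (A pops a problem in the pass of exactly
-- this reason; B classifies by it)
def pvFind (rs : List String) (e : String × List (String × List Int)) : Option String :=
  rs.find? (fun r => pvNonempty e.2 r)

def pvOrd {α : Type} (rev : Bool) (l : List α) : List α := if rev then l.reverse else l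

lemma pvOrd_true {α : Type} (l : List α) : pvOrd true l = l.reverse := rfl

lemma pvOrd_false {α : Type} (l : List α) : pvOrd false l = l := rfl

lemma pvCls_eq_find (e : String × List (String × List Int)) :
    pvCls e.2 = pvFind (pvReasonsBan ++ pvReasonsInfo) e := rfl

lemma pvNonempty_nil (r : String) : pvNonempty [] r = false := by simp [pvNonempty]

lemma pvLookup_cons_self {β : Type} (k : String) (v : β) (t : List (String × β)) :
    List.lookup k ((k, v) :: t) = some v := by
  rw [List.lookup_cons]; simp

lemma pvLookup_cons_ne {β : Type} {k k' : String} (v : β) (t : List (String × β)) (h : k' ≠ k) :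
    List.lookup k' ((k, v) :: t) = List.lookup k' t := by
  rw [List.lookup_cons]
  have hb : (k' == k) = false := by simp [h]
  rw [hb]

lemma pvLookup_none_iff {β : Type} (d : List (String × β)) (k : String) :
    List.lookup k d = none ↔ k ∉ d.map Prod.fst := by
  induction d with
  | nil => simp
  | cons e t ih =>
      obtain ⟨k0, v0⟩ := e
      by_cases hk : k = k0
      · subst hk; rw [pvLookup_cons_self]; simp
      · rw [pvLookup_cons_ne v0 t hk]; simp [ih, hk]

lemma pvLookup_self_of_mem {β : Type} {d : List (String × β)}
    (hnd : (d.map Prod.fst).Nodup) {e : String × β} (he : e ∈ d) :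
    List.lookup e.1 d = some e.2 := by
  induction d with
  | nil => cases he
  | cons e0 t ih =>
      obtain ⟨k0, v0⟩ := e0
      simp only [List.map_cons, List.nodup_cons] at hnd
      rcases List.mem_cons.1 he with h | h
      · subst h; exact pvLookup_cons_self _ _ _
      · have hne : e.1 ≠ k0 := fun hk => hnd.1 (hk ▸ List.mem_map_of_mem h)
        rw [pvLookup_cons_ne v0 t hne]
        exact ih hnd.2 h

lemma pvEraseP_eq_filter {β : Type} (d : List (String × β)) (k : String)
    (hnd : (d.map Prod.fst).Nodup) :
    d.eraseP (fun e => e.1 == k) = d.filter (fun e => !(e.1 == k)) := by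
  induction d with
  | nil => rfl
  | cons e t ih =>
      obtain ⟨k0, v0⟩ := e
      simp only [List.map_cons, List.nodup_cons] at hnd
      by_cases hk : k0 = k
      · subst hk
        rw [List.eraseP_cons_of_pos (by simp), List.filter_cons_of_neg (by simp)]
        symm
        apply List.filter_eq_self.2
        intro a ha
        have : a.1 ≠ k0 := fun hae => hnd.1 (hae ▸ List.mem_map_of_mem ha)
        simp [this]
      · rw [List.eraseP_cons_of_neg (by simp [hk]), List.filter_cons_of_pos (by simp [hk])]
        rw [ih hnd.2]

lemma pvLookup_filter_ne {β : Type} (d : List (String × β)) (k k' : String) (h : k' ≠ k) :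
    List.lookup k' (d.filter (fun e => !(e.1 == k))) = List.lookup k' d := by
  induction d with
  | nil => rfl
  | cons e t ih =>
      obtain ⟨k0, v0⟩ := e
      by_cases hk0 : k0 = k
      · subst hk0
        rw [List.filter_cons_of_neg (by simp), pvLookup_cons_ne v0 t h]
        exact ih
      · rw [List.filter_cons_of_pos (by simp [hk0])]
        by_cases hkk : k' = k0
        · subst hkk; rw [pvLookup_cons_self, pvLookup_cons_self]
        · rw [pvLookup_cons_ne v0 _ hkk, pvLookup_cons_ne v0 t hkk]
          exact ih

lemma pvNodup_filter {β : Type} (d : List (String × β)) (p : (String × β) → Bool)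
    (hnd : (d.map Prod.fst).Nodup) : ((d.filter p).map Prod.fst).Nodup :=
  hnd.sublist ((d.filter_sublist).map Prod.fst)

-- one inner pass of A over an arbitrary duplicate-free snapshot of keys
lemma pvPass_fold (r : String) (ks : List String) :
    ∀ (acc d : List (String × List (String × List Int))),
    (d.map Prod.fst).Nodup → ks.Nodup →
    ks.foldl (fun st' p =>
      if pvNonempty ((List.lookup p st'.2).getD []) r then
        (st'.1 ++ [(p, (List.lookup p st'.2).getD [])], st'.2.eraseP (fun e => e.1 == p))
      else st') (acc, d)
    = (acc ++ ks.filterMap (fun k => (List.lookup k d).bind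
          (fun v => if pvNonempty v r then some (k, v) else none)),
       d.filter (fun e => !(decide (e.1 ∈ ks) && pvNonempty e.2 r))) := by
  induction ks with
  | nil => intro acc d hnd hks; simp
  | cons k ks ih =>
      intro acc d hnd hks
      simp only [List.nodup_cons] at hks
      rw [List.foldl_cons]
      rcases hl : List.lookup k d with _ | v
      · -- key absent (cannot happen on a real snapshot): the step is a no-op
        simp only [Option.getD_none, pvNonempty_nil]
        rw [if_neg (by simp), ih acc d hnd hks.2]
        have hkk : k ∉ d.map Prod.fst := (pvLookup_none_iff d k).1 hl
        refine congrArg₂ Prod.mk ?_ ?_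
        · rw [List.filterMap_cons]; simp [hl]
        · apply List.filter_congr
          intro e he
          have : e.1 ≠ k := fun h => hkk (h ▸ List.mem_map_of_mem he)
          simp [List.mem_cons, this]
      · rcases hc : pvNonempty v r with _ | _
        · -- list empty for this reason: skip
          simp only [Option.getD_some]
          rw [if_neg (by simp [hc]), ih acc d hnd hks.2]
          refine congrArg₂ Prod.mk ?_ ?_
          · rw [List.filterMap_cons]; simp [hl, hc]
          · apply List.filter_congr
            intro e he
            by_cases hek : e.1 = k
            · have hsv : some e.2 = some v := by rw [← hl, ← hek, pvLookup_self_of_mem hnd he]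
              have hev : e.2 = v := by injection hsv
              simp [hev, hc]
            · simp [List.mem_cons, hek]
        · -- pop the problem
          simp only [Option.getD_some]
          rw [if_pos (by simp [hc]), pvEraseP_eq_filter d k hnd,
              ih (acc ++ [(k, v)]) (d.filter (fun e => !(e.1 == k)))
                (pvNodup_filter d _ hnd) hks.2]
          refine congrArg₂ Prod.mk ?_ ?_
          · rw [List.filterMap_cons]
            simp only [hl, Option.bind_some, hc, List.append_assoc,
              List.singleton_append]
            congr 2
            apply List.filterMap_congr
            intro k' hk'
            have : k' ≠ k := fun h => hks.1 (h ▸ hk')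
            rw [pvLookup_filter_ne d k k' this]
          · rw [List.filter_filter]
            apply List.filter_congr
            intro e he
            by_cases hek : e.1 = k
            · have hsv : some e.2 = some v := by rw [← hl, ← hek, pvLookup_self_of_mem hnd he]
              have hev : e.2 = v := by injection hsv
              simp [hek, hev, hc]
            · simp [List.mem_cons, hek]

-- iterating the snapshot of ALL keys: the popped problems are exactly the matching entries
lemma pvFilterMap_keys (r : String) :
    ∀ (d : List (String × List (String × List Int))), (d.map Prod.fst).Nodup →
    (d.map Prod.fst).filterMap (fun k => (List.lookup k d).bind
        (fun v => if pvNonempty v r then some (k, v) else none))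
    = d.filter (fun e => pvNonempty e.2 r) := by
  intro d
  induction d with
  | nil => intro _; rfl
  | cons e t ih =>
      intro hnd
      obtain ⟨k, v⟩ := e
      simp only [List.map_cons, List.nodup_cons] at hnd ⊢
      have htail : (t.map Prod.fst).filterMap (fun k' => (List.lookup k' ((k, v) :: t)).bind
          (fun w => if pvNonempty w r then some (k', w) else none))
          = (t.map Prod.fst).filterMap (fun k' => (List.lookup k' t).bind
          (fun w => if pvNonempty w r then some (k', w) else none)) := by
        apply List.filterMap_congr
        intro k' hk'
        have : k' ≠ k := fun h => hnd.1 (h ▸ hk')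
        rw [pvLookup_cons_ne v t this]
      rcases hc : pvNonempty v r with _ | _
      · rw [List.filterMap_cons_none
              (f := fun k' => (List.lookup k' ((k, v) :: t)).bind
                  (fun w => if pvNonempty w r then some (k', w) else none))
              (by simp [hc]),
            htail, ih hnd.2, List.filter_cons_of_neg (by simp [hc])]
      · rw [List.filterMap_cons_some
              (f := fun k' => (List.lookup k' ((k, v) :: t)).bind
                  (fun w => if pvNonempty w r then some (k', w) else none))
              (b := (k, v))
              (by simp [hc]),
            htail, ih hnd.2, List.filter_cons_of_pos (by simp [hc])]

-- closed form of one full pass of A for one reason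
lemma pvPass_closed (rev : Bool) (r : String) (acc d : List (String × List (String × List Int)))
    (hnd : (d.map Prod.fst).Nodup) :
    pvPass rev r (acc, d)
    = (acc ++ pvOrd rev (d.filter (fun e => pvNonempty e.2 r)),
       d.filter (fun e => !(pvNonempty e.2 r))) := by
  cases rev
  · show (d.map Prod.fst).foldl _ (acc, d) = _
    rw [pvPass_fold r (d.map Prod.fst) acc d hnd hnd]
    refine congrArg₂ Prod.mk ?_ ?_
    · rw [pvFilterMap_keys r d hnd]; rfl
    · apply List.filter_congr
      intro e he
      simp [List.mem_map_of_mem (f := Prod.fst) he]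
  · show ((d.map Prod.fst).reverse).foldl _ (acc, d) = _
    rw [pvPass_fold r (d.map Prod.fst).reverse acc d hnd (by simpa using hnd)]
    refine congrArg₂ Prod.mk ?_ ?_
    · rw [List.filterMap_reverse, pvFilterMap_keys r d hnd]; rfl
    · apply List.filter_congr
      intro e he
      simp [List.mem_map_of_mem (f := Prod.fst) he]

lemma pvFind_cons (r : String) (rs : List String) (e : String × List (String × List Int)) :
    pvFind (r :: rs) e = if pvNonempty e.2 r then some r else pvFind rs e := by
  rw [pvFind, List.find?_cons]
  cases pvNonempty e.2 r <;> simp [pvFind]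

lemma pvFind_mem {rs : List String} {e : String × List (String × List Int)} {r : String}
    (h : pvFind rs e = some r) : r ∈ rs := List.mem_of_find?_eq_some h

-- A's chain of passes, in closed form: each problem lands in the chunk of its FIRST
-- applicable reason, ban chunks reversed, info chunks forward
lemma pvChain (rev : Bool) :
    ∀ (rs : List String) (acc d : List (String × List (String × List Int))),
    rs.Nodup → (d.map Prod.fst).Nodup →
    rs.foldl (fun st r => pvPass rev r st) (acc, d)
    = (acc ++ rs.flatMap (fun r => pvOrd rev (d.filter (fun e => pvFind rs e == some r))),
       d.filter (fun e => (pvFind rs e).isNone)) := by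
  intro rs
  induction rs with
  | nil => intro acc d _ _; simp [pvFind]
  | cons r rs ih =>
      intro acc d hrs hnd
      simp only [List.nodup_cons] at hrs
      rw [List.foldl_cons, pvPass_closed rev r acc d hnd,
          ih _ (d.filter (fun e => !(pvNonempty e.2 r))) hrs.2 (pvNodup_filter d _ hnd)]
      have hE1 : d.filter (fun e => pvNonempty e.2 r)
          = d.filter (fun e => pvFind (r :: rs) e == some r) := by
        apply List.filter_congr
        intro e _
        rcases hc : pvNonempty e.2 r with _ | _
        · rcases hf : pvFind rs e with _ | x
          · simp [pvFind_cons, hc, hf]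
          · have hx : x ≠ r := fun h => hrs.1 (h ▸ pvFind_mem hf)
            simp [pvFind_cons, hc, hf, hx]
        · simp [pvFind_cons, hc]
      have hE2 : ∀ r' ∈ rs,
          (d.filter (fun e => !(pvNonempty e.2 r))).filter (fun e => pvFind rs e == some r')
          = d.filter (fun e => pvFind (r :: rs) e == some r') := by
        intro r' hr'
        rw [List.filter_filter]
        apply List.filter_congr
        intro e _
        rcases hc : pvNonempty e.2 r with _ | _
        · simp [pvFind_cons, hc]
        · have hne : r ≠ r' := fun h => hrs.1 (h ▸ hr')
          simp [pvFind_cons, hc, hne]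
      have hE3 : (d.filter (fun e => !(pvNonempty e.2 r))).filter
            (fun e => (pvFind rs e).isNone)
          = d.filter (fun e => (pvFind (r :: rs) e).isNone) := by
        rw [List.filter_filter]
        apply List.filter_congr
        intro e _
        rcases hc : pvNonempty e.2 r with _ | _ <;> simp [pvFind_cons, hc]
      refine congrArg₂ Prod.mk ?_ ?_
      · rw [List.flatMap_cons, ← List.append_assoc]
        congr 1
        · rw [hE1]
        · apply List.flatMap_congr
          intro r' hr'
          rw [hE2 r' hr']
      · exact hE3

-- A's final loop pops every remaining problem in order
lemma pvDrain_fold :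
    ∀ (ks : List String) (acc d : List (String × List (String × List Int))),
    ks.Nodup → (d.map Prod.fst).Nodup →
    ks.foldl (fun st p =>
        (st.1 ++ [(p, (List.lookup p st.2).getD [])], st.2.eraseP (fun e => e.1 == p))) (acc, d)
    = (acc ++ ks.map (fun k => (k, (List.lookup k d).getD [])),
       d.filter (fun e => !(decide (e.1 ∈ ks)))) := by
  intro ks
  induction ks with
  | nil => intro acc d _ _; simp
  | cons k ks ih =>
      intro acc d hks hnd
      simp only [List.nodup_cons] at hks
      rw [List.foldl_cons, pvEraseP_eq_filter d k hnd,
          ih (acc ++ [(k, (List.lookup k d).getD [])]) (d.filter (fun e => !(e.1 == k)))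
            hks.2 (pvNodup_filter d _ hnd)]
      refine congrArg₂ Prod.mk ?_ ?_
      · rw [List.map_cons, List.append_assoc, List.singleton_append]
        congr 2
        apply List.map_congr_left
        intro k' hk'
        have : k' ≠ k := fun h => hks.1 (h ▸ hk')
        rw [pvLookup_filter_ne d k k' this]
      · rw [List.filter_filter]
        apply List.filter_congr
        intro e he
        by_cases hek : e.1 = k <;> simp [List.mem_cons, hek]

lemma pvKeys_map_self :
    ∀ (d : List (String × List (String × List Int))), (d.map Prod.fst).Nodup →
    (d.map Prod.fst).map (fun k => (k, (List.lookup k d).getD [])) = d := by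
  intro d
  induction d with
  | nil => intro _; rfl
  | cons e t ih =>
      intro hnd
      obtain ⟨k, v⟩ := e
      simp only [List.map_cons, List.nodup_cons] at hnd
      simp only [List.map_cons, pvLookup_cons_self, Option.getD_some]
      have htail : (t.map Prod.fst).map (fun k' => (k', (List.lookup k' ((k, v) :: t)).getD []))
          = (t.map Prod.fst).map (fun k' => (k', (List.lookup k' t).getD [])) := by
        apply List.map_congr_left
        intro k' hk'
        have : k' ≠ k := fun h => hnd.1 (h ▸ hk')
        rw [pvLookup_cons_ne v t this]
      rw [htail, ih hnd.2]

-- B's tagged-list comprehensions are plain filters of the input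
lemma pvTagged_filter (pd : List (String × List (String × List Int))) (p : Option String → Bool) :
    ((pd.map (fun pr => (pr.1, pr.2, pvCls pr.2))).filter (fun t => p t.2.2)).map
        (fun t => (t.1, t.2.1))
    = pd.filter (fun e => p (pvCls e.2)) := by
  induction pd with
  | nil => rfl
  | cons e t ih =>
      rcases hc : p (pvCls e.2) with _ | _
      · rw [List.map_cons, List.filter_cons_of_neg (by simpa using hc),
            List.filter_cons_of_neg (by simpa using hc), ih]
      · rw [List.map_cons, List.filter_cons_of_pos (by simpa using hc),
            List.filter_cons_of_pos (by simpa using hc), List.map_cons, ih]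

lemma pvTagged_filter_rev (pd : List (String × List (String × List Int)))
    (p : Option String → Bool) :
    (((pd.map (fun pr => (pr.1, pr.2, pvCls pr.2))).reverse.filter (fun t => p t.2.2)).map
        (fun t => (t.1, t.2.1)))
    = (pd.filter (fun e => p (pvCls e.2))).reverse := by
  rw [← List.map_reverse, pvTagged_filter, List.filter_reverse]

lemma pvDisjoint : ∀ x ∈ pvReasonsBan, x ∉ pvReasonsInfo := by decide

lemma pvCls_ban (r : String) (hr : r ∈ pvReasonsBan) (e : String × List (String × List Int)) :
    (pvCls e.2 == some r) = (pvFind pvReasonsBan e == some r) := by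
  have hsplit : pvCls e.2 = (pvFind pvReasonsBan e).or (pvFind pvReasonsInfo e) := by
    rw [pvCls_eq_find, pvFind, List.find?_append]; rfl
  rcases hf : pvFind pvReasonsBan e with _ | x
  · rw [hsplit, hf, Option.none_or]
    rcases hg : pvFind pvReasonsInfo e with _ | y
    · rfl
    · have : y ≠ r := fun h => pvDisjoint r hr (h ▸ pvFind_mem hg)
      simp [this]
  · rw [hsplit, hf, Option.some_or]

lemma pvCls_info (r : String) (hr : r ∈ pvReasonsInfo) (e : String × List (String × List Int)) :
    (pvCls e.2 == some r)
    = ((pvFind pvReasonsBan e).isNone && (pvFind pvReasonsInfo e == some r)) := by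
  have hsplit : pvCls e.2 = (pvFind pvReasonsBan e).or (pvFind pvReasonsInfo e) := by
    rw [pvCls_eq_find, pvFind, List.find?_append]; rfl
  rcases hf : pvFind pvReasonsBan e with _ | x
  · rw [hsplit, hf, Option.none_or]; rfl
  · rw [hsplit, hf, Option.some_or]
    have : x ≠ r := fun h => pvDisjoint x (pvFind_mem hf) (h ▸ hr)
    simp [this]

lemma pvCls_none (e : String × List (String × List Int)) :
    (pvCls e.2).isNone = ((pvFind pvReasonsBan e).isNone && (pvFind pvReasonsInfo e).isNone) := by
  have hsplit : pvCls e.2 = (pvFind pvReasonsBan e).or (pvFind pvReasonsInfo e) := by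
    rw [pvCls_eq_find, pvFind, List.find?_append]; rfl
  rcases hf : pvFind pvReasonsBan e with _ | x
  · rw [hsplit, hf, Option.none_or]; rfl
  · rw [hsplit, hf, Option.some_or]; rfl

-- the central equation: on duplicate-free keys the two ports agree
set_option maxHeartbeats 2000000 in
lemma pvMain (pd : List (String × List (String × List Int)))
    (hnd : (pd.map Prod.fst).Nodup) :
    sort_raw_tactics_data pd = sort_raw_tactics_data_alt pd := by
  have hBan : pvReasonsBan.Nodup := by decide
  have hInfo : pvReasonsInfo.Nodup := by decide
  have hA1 := pvChain true pvReasonsBan [] pd hBan hnd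
  set d1 := pd.filter (fun e => (pvFind pvReasonsBan e).isNone) with hd1
  have hnd1 : (d1.map Prod.fst).Nodup := pvNodup_filter pd _ hnd
  have hA2 := pvChain false pvReasonsInfo [] d1 hInfo hnd1
  set d2 := d1.filter (fun e => (pvFind pvReasonsInfo e).isNone) with hd2
  have hnd2 : (d2.map Prod.fst).Nodup := pvNodup_filter d1 _ hnd1
  have hA3 := pvDrain_fold (d2.map Prod.fst)
      (pvReasonsInfo.flatMap (fun r => d1.filter (fun e => pvFind pvReasonsInfo e == some r))) d2
      hnd2 hnd2
  have hAval : sort_raw_tactics_data pd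
      = (pvReasonsBan.flatMap (fun r =>
            (pd.filter (fun e => pvFind pvReasonsBan e == some r)).reverse),
         pvReasonsInfo.flatMap (fun r => d1.filter (fun e => pvFind pvReasonsInfo e == some r))
           ++ d2) := by
    unfold sort_raw_tactics_data
    simp only [hA1, hA2, List.nil_append, pvOrd_true, pvOrd_false]
    rw [hA3, pvKeys_map_self d2 hnd2]
  have hBval : sort_raw_tactics_data_alt pd
      = (pvReasonsBan.flatMap (fun r =>
            (pd.filter (fun e => pvCls e.2 == some r)).reverse),
         pvReasonsInfo.flatMap (fun r => pd.filter (fun e => pvCls e.2 == some r))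
           ++ pd.filter (fun e => (pvCls e.2).isNone)) := by
    unfold sort_raw_tactics_data_alt
    refine congrArg₂ Prod.mk ?_ (congrArg₂ (· ++ ·) ?_ ?_)
    · exact List.flatMap_congr (fun r _ => pvTagged_filter_rev pd (fun o => o == some r))
    · exact List.flatMap_congr (fun r _ => pvTagged_filter pd (fun o => o == some r))
    · exact pvTagged_filter pd Option.isNone
  have hBans : pvReasonsBan.flatMap (fun r =>
        (pd.filter (fun e => pvFind pvReasonsBan e == some r)).reverse)
      = pvReasonsBan.flatMap (fun r =>
        (pd.filter (fun e => pvCls e.2 == some r)).reverse) := by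
    apply List.flatMap_congr
    intro r hr
    rw [List.filter_congr (fun e _ => (pvCls_ban r hr e).symm)]
  have hInfos : pvReasonsInfo.flatMap (fun r =>
        d1.filter (fun e => pvFind pvReasonsInfo e == some r))
      = pvReasonsInfo.flatMap (fun r => pd.filter (fun e => pvCls e.2 == some r)) := by
    apply List.flatMap_congr
    intro r hr
    rw [hd1, List.filter_filter]
    apply List.filter_congr
    intro e _
    rcases hf : pvFind pvReasonsBan e with _ | x
    · rw [pvCls_info r hr e]; simp [hf]
    · rw [pvCls_info r hr e]; simp [hf]
  have hOther : d2 = pd.filter (fun e => (pvCls e.2).isNone) := by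
    rw [hd2, hd1, List.filter_filter]
    apply List.filter_congr
    intro e _
    rw [pvCls_none e]
    exact Bool.and_comm _ _
  rw [hAval, hBval, hBans, hInfos, hOther]

-- ===== VERDICT (by name: the statement is the Claim_ definition above) =====
theorem sort_raw_tactics_data_spec : Claim_equal_sort_raw_tactics_data := by
  intro pd _ hpre
  unfold Spec_sort_raw_tactics_data
  exact pvMain pd hpre.1
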